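-- pv_equiv track=rewrite | github.com/DzakaAthif/search-algorithms | search_algo.py | switch_letters
-- ===== SOURCE A (Python) =====
-- def switch_letters(message, letters):
--
--     message = list(message)
--
--     lower_lett = letters[0]+letters[1]
--     lower_lett = lower_lett.lower()
--
--     condition = (letters[0] not in message) \
--         and (letters[1] not in message) \
--         and (lower_lett[0] not in message) \
--         and (lower_lett[1] not in message)
--
--     if condition == True:
--         return ""
--
--     for i in range(len(message)):
--         if message[i] == letters[0]:
--             message[i] = letters[1]
--
--         elif message[i] == letters[1]:
--             message[i] = letters[0]
--
--         elif message[i] ==  lower_lett[0]: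
--             message[i] = lower_lett[1]
--
--         elif message[i] ==  lower_lett[1]:
--             message[i] = lower_lett[0]
--
--     return "".join(message)
-- ===== SOURCE B (Python) =====
-- def switch_letters(message, letters):
--     # Rule-major rewrite: four staged passes, one per swap rule in priority
--     # order, over (char, replacement-or-None) cells; a later rule never touches
--     # a cell an earlier rule already claimed.
--     lower_lett = (letters[0] + letters[1]).lower()
--     rules = ((letters[0], letters[1]), (letters[1], letters[0]),
--              (lower_lett[0], lower_lett[1]), (lower_lett[1], lower_lett[0]))
--     cells = [(ch, None) for ch in message]
--     for src, dst in rules: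
--         cells = [(ch, dst if rep is None and ch == src else rep)
--                  for ch, rep in cells]
--     if all(rep is None for _, rep in cells):
--         return ""
--     return "".join(ch if rep is None else rep for ch, rep in cells)
-- ===== Notes on version B (the rewrite author's own statement) =====
-- stated objective: alternative
-- what changed: Replaces A's single character-major pass with its four-way elif chain by a rule-major algorithm: four staged whole-message passes, one per swap rule in priority order, over (char, replacement-or-None) cells, with the empty-result guard derived from the cells (no rule claimed any cell) instead of A's up-front membership test; …
-- outside the precondition, e.g. on switch_letters('t', ['t', '']): A returns '', B raises IndexError
import Mathlib
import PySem

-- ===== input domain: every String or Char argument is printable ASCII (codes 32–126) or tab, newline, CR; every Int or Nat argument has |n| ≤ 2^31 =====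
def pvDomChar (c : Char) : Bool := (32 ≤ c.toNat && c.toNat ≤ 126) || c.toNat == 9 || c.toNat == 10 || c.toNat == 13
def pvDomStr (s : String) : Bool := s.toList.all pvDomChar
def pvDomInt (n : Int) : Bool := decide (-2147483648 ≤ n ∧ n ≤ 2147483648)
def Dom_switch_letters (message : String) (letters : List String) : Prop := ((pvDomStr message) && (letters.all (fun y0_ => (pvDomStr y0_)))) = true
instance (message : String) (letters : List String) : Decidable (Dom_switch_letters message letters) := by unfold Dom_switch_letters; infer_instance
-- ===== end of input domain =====

-- B replaces A's single character-major pass (four-way elif chain) by a rule-major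
-- algorithm: four staged whole-message passes over (char, replacement) cells.
-- Objective: alternative decomposition; not claimed faster.

-- Python '==' between a string s and a character c (a length-1 string): true iff s is exactly [c]
def pyEqCS (s : String) (c : Char) : Bool := s.toList == [c]

-- ===== PORT A =====
-- literal transliteration: 'message[i] = letters[1]' may place a whole STRING into the
-- char list, and ''.join concatenates it — modelled as map-to-List-Char then flatten.
def switch_letters (message : String) (letters : List String) : String :=
  match letters with
  | l0 :: l1 :: _ =>
    let msg := message.toList
    match PySem.Chars.lower (l0.toList ++ l1.toList) with
    | a :: b :: _ =>
      let condition := !(msg.any (pyEqCS l0)) && !(msg.any (pyEqCS l1))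
                       && !(msg.contains a) && !(msg.contains b)
      if condition then ""
      else String.ofList ((msg.map (fun c =>
        if pyEqCS l0 c then l1.toList
        else if pyEqCS l1 c then l0.toList
        else if c == a then [b]
        else if c == b then [a]
        else [c])).flatten)
    | _ => ""   -- lower_lett[0]/[1] would raise IndexError (outside Pre_)
  | _ => ""     -- letters[0]/letters[1] would raise IndexError (outside Pre_)

-- ===== PORT B =====
-- one staged pass of Source B: claim every still-unclaimed cell whose char equals src
def applyRule (sd : String × String) (cells : List (Char × Option String)) :
    List (Char × Option String) :=
  cells.map (fun p => (p.1, if p.2 == none && pyEqCS sd.1 p.1 then some sd.2 else p.2))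

def switch_letters_alt (message : String) (letters : List String) : String :=
  match letters.head?, letters.tail.head? with
  | some l0, some l1 =>
    let low := PySem.Chars.lower (l0.toList ++ l1.toList)
    match low.head?, low.tail.head? with
    | some a, some b =>
      let rules : List (String × String) :=
        [(l0, l1), (l1, l0),
         (String.ofList [a], String.ofList [b]), (String.ofList [b], String.ofList [a])]
      let cells0 : List (Char × Option String) := message.toList.map (fun ch => (ch, none))
      let cells := rules.foldl (fun cs sd => applyRule sd cs) cells0
      if cells.all (fun p => p.2 == none) then ""
      else String.ofList ((cells.map (fun p =>
        match p.2 with | none => [p.1] | some r => r.toList)).flatten)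
    | _, _ => ""   -- lower_lett[0]/[1] would raise IndexError (outside Pre_)
  | _, _ => ""     -- letters[0]/letters[1] would raise IndexError (outside Pre_)

-- ===== PRECONDITION & SPEC =====
-- Pre_ excludes inputs where letters[0]/letters[1] or lower_lett[0]/lower_lett[1] indexing
-- can raise IndexError: fewer than two strings in letters, or letters[0]+letters[1] shorter
-- than two characters (on some of the latter A still returns via and-short-circuiting or an
-- early replacement, but B's eager construction of the rule list raises IndexError there).
def Pre_switch_letters (message : String) (letters : List String) : Prop :=
  2 ≤ letters.length ∧ 2 ≤ (letters.getD 0 "").toList.length + (letters.getD 1 "").toList.length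
instance (message : String) (letters : List String) : Decidable (Pre_switch_letters message letters) := by unfold Pre_switch_letters; infer_instance
def pvWitness_switch_letters : String × List String := ("aBba!", ["A", "B"])

def Spec_switch_letters (message : String) (letters : List String) (out : String) : Prop := out = switch_letters_alt message letters
instance (message : String) (letters : List String) (out : String) : Decidable (Spec_switch_letters message letters out) := by unfold Spec_switch_letters; infer_instance

-- ===== CLAIM (what is proved, stated in full; the proofs are below) =====
def Claim_equal_switch_letters : Prop := ∀ (message : String) (letters : List String), Dom_switch_letters message letters → Pre_switch_letters message letters → Spec_switch_letters message letters (switch_letters message letters)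

-- ===== LEMMAS AND PROOFS =====

-- the four staged passes of B, fused: each cell ends up with the first matching rule's dst
set_option maxHeartbeats 1000000 in
theorem cells_eq (l0 l1 : String) (a b : Char) (msg : List Char) :
    ([(l0, l1), (l1, l0),
      (String.ofList [a], String.ofList [b]), (String.ofList [b], String.ofList [a])].foldl
        (fun cs sd => applyRule sd cs) (msg.map (fun ch => (ch, none)))) =
    msg.map (fun ch => (ch,
      if pyEqCS l0 ch then some l1
      else if pyEqCS l1 ch then some l0
      else if ch == a then some (String.ofList [b])
      else if ch == b then some (String.ofList [a])
      else none)) := by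
  simp only [List.foldl_cons, List.foldl_nil, applyRule, List.map_map]
  apply List.map_congr_left
  intro ch _
  simp only [Function.comp_apply]
  by_cases h1 : pyEqCS l0 ch <;> by_cases h2 : pyEqCS l1 ch <;>
    by_cases h3 : ch = a <;> by_cases h4 : ch = b <;>
    simp [pyEqCS, h1, h2, h3, h4, @eq_comm Char a ch, @eq_comm Char b ch] <;>
    split_ifs <;> (first | rfl | tauto | simp_all)

-- B's 'no cell claimed' test, per character, equals the negation of A's four membership tests
theorem guard_char (l0 l1 : String) (a b x : Char) :
    ((if pyEqCS l0 x then some l1 else if pyEqCS l1 x then some l0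
      else if x == a then some (String.ofList [b]) else if x == b then some (String.ofList [a]) else none) == none)
    = (!(pyEqCS l0 x) && !(pyEqCS l1 x) && !(a == x) && !(b == x)) := by
  split_ifs <;> simp_all [beq_iff_eq, @eq_comm Char a x, @eq_comm Char b x]

-- ===== VERDICT (by name: the statement is the Claim_ definition above) =====
theorem switch_letters_spec : Claim_equal_switch_letters := by
  intro message letters _ hpre
  obtain ⟨hlen, hsum⟩ := hpre
  unfold Spec_switch_letters
  rcases letters with _ | ⟨l0, _ | ⟨l1, rest⟩⟩
  · simp at hlen
  · simp at hlen
  · simp at hsum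
    have hlow : 2 ≤ (PySem.Chars.lower (l0.toList ++ l1.toList)).length := by
      simp [PySem.Chars.lower]
      omega
    rcases hl : PySem.Chars.lower (l0.toList ++ l1.toList) with _ | ⟨a, _ | ⟨b, t⟩⟩
    · rw [hl] at hlow; simp at hlow
    · rw [hl] at hlow; simp at hlow
    · simp only [switch_letters, switch_letters_alt, hl, List.head?_cons, List.tail_cons]
      rw [cells_eq]
      have hguard :
          ((message.toList.map (fun ch => (ch,
            if pyEqCS l0 ch then some l1
            else if pyEqCS l1 ch then some l0
            else if ch == a then some (String.ofList [b])
            else if ch == b then some (String.ofList [a])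
            else none))).all (fun p => p.2 == none)) =
          (!(message.toList.any (pyEqCS l0)) && !(message.toList.any (pyEqCS l1))
            && !(message.toList.contains a) && !(message.toList.contains b)) := by
        simp only [List.all_map, Function.comp_def, guard_char]
        rw [Bool.eq_iff_iff]
        simp only [List.all_eq_true, Bool.and_eq_true, Bool.not_eq_true', List.any_eq_false,
          List.contains_eq_any_beq]
        constructor
        · intro h
          refine ⟨⟨⟨fun x hx => ?_, fun x hx => ?_⟩, fun x hx => ?_⟩, fun x hx => ?_⟩ <;>
            simp [(h x hx).1.1.1, (h x hx).1.1.2, (h x hx).1.2, (h x hx).2]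
        · rintro ⟨⟨⟨h1, h2⟩, h3⟩, h4⟩ x hx
          refine ⟨⟨⟨?_, ?_⟩, ?_⟩, ?_⟩ <;> simp [h1 x hx, h2 x hx, h3 x hx, h4 x hx]
      rw [hguard]
      split_ifs
      · rfl
      · refine congrArg String.ofList (congrArg List.flatten ?_)
        rw [List.map_map]
        apply List.map_congr_left
        intro c _
        simp only [Function.comp_apply]
        split_ifs <;> simp [String.toList_ofList]
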